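-- pv_equiv track=rewrite | github.com/octopus-platform/joern | python/joern-tools/joern/shelltool/PlotConfiguration.py | _getItemsFromSpec
-- ===== SOURCE A (Python) =====
-- def _getItemsFromSpec(spec,data,withkey=False):
--     if spec == "*":
--         if withkey:
--             return [(k,[k,v]) for k,v in data.items()]
--         else:
--             return [(k,[v]) for k,v in data.items()]
--     try:
--         if withkey:
--             return [ (spec,[ spec, data[spec] ]) ]
--         return [ (spec,[ data[spec] ]) ]
--     except KeyError:
--         return []
-- ===== SOURCE B (Python) =====
-- def _getItemsFromSpec(spec, data, withkey=False):
--     fmt = (lambda k, v: [k, v]) if withkey else (lambda k, v: [v])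
--     return [(k, fmt(k, v)) for k, v in data.items() if spec == "*" or k == spec]
-- ===== Notes on version B (the rewrite author's own statement) =====
-- stated objective: alternative
-- what changed: B makes a single filtering pass over all items, selecting each item whose key matches spec or when spec is '*', instead of A's branch on spec with a direct dict lookup guarded by try/except; correct because dict keys are unique, so the scan picks exactly the looked-up entry.
import Mathlib
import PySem

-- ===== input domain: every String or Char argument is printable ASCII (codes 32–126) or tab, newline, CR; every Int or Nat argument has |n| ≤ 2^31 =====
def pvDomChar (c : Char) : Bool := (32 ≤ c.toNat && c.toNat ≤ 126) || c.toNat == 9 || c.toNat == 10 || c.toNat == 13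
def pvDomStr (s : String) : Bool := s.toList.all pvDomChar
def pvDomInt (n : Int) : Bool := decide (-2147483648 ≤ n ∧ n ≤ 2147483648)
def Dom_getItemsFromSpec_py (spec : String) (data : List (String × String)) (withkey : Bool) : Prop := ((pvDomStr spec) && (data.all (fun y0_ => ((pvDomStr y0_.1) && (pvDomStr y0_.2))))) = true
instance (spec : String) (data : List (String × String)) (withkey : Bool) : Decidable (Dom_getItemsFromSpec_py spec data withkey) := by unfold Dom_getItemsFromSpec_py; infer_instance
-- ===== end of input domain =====

-- B replaces A's branch-on-spec with one filtering pass over all items (alternative decomposition; no speed claim).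


-- ===== PORT A =====
def getItemsFromSpec_py (spec : String) (data : List (String × String)) (withkey : Bool) : List (String × List String) :=
  -- the dict parameter: assoc list → PySem.Dict (insertion order, last value wins)
  let d := PySem.Dict.ofList data
  if spec = "*" then
    if withkey then
      d.items.map (fun kv => (kv.1, [kv.1, kv.2]))
    else
      d.items.map (fun kv => (kv.1, [kv.2]))
  else
    -- try: data[spec] … except KeyError: return []
    match d.get? spec with
    | some v => if withkey then [(spec, [spec, v])] else [(spec, [v])]
    | none => []

-- ===== PORT B =====
def getItemsFromSpec_py_alt (spec : String) (data : List (String × String)) (withkey : Bool) : List (String × List String) :=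
  let d := PySem.Dict.ofList data
  -- fmt = (lambda k, v: [k, v]) if withkey else (lambda k, v: [v])
  let fmt : String → String → List String := if withkey then (fun k v => [k, v]) else (fun _ v => [v])
  -- [(k, fmt(k, v)) for k, v in data.items() if spec == "*" or k == spec]
  (d.items.filter (fun kv => spec == "*" || kv.1 == spec)).map (fun kv => (kv.1, fmt kv.1 kv.2))

-- ===== PRECONDITION & SPEC =====
def Spec_getItemsFromSpec_py (spec : String) (data : List (String × String)) (withkey : Bool) (out : List (String × List String)) : Prop := out = getItemsFromSpec_py_alt spec data withkey
instance (spec : String) (data : List (String × String)) (withkey : Bool) (out : List (String × List String)) : Decidable (Spec_getItemsFromSpec_py spec data withkey out) := by unfold Spec_getItemsFromSpec_py; infer_instance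

-- ===== CLAIM =====
def Claim_equal_getItemsFromSpec_py : Prop := ∀ (spec : String) (data : List (String × String)) (withkey : Bool), Dom_getItemsFromSpec_py spec data withkey → Spec_getItemsFromSpec_py spec data withkey (getItemsFromSpec_py spec data withkey)

-- ===== LEMMAS AND PROOFS =====

-- A dict with nodup keys: filtering its items for key = spec is [(spec, v)] when get? spec = some v, else [].
theorem filter_items_key_eq (d : PySem.Dict String String) (hnd : d.keys.Nodup) (spec : String) :
    d.items.filter (fun kv => kv.1 == spec)
      = (match d.get? spec with
         | some v => [(spec, v)]
         | none => []) := by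
  cases h : d.get? spec with
  | none =>
    rw [PySem.Dict.get?_eq_none_iff_not_mem_keys] at h
    simp only [List.filter_eq_nil_iff]
    intro kv hkv
    simp only [beq_iff_eq]
    intro hk
    exact h (hk ▸ PySem.Dict.mem_keys_of_mem_items d hkv)
  | some v =>
    have hmem : (spec, v) ∈ d.items := PySem.Dict.mem_items_of_get?_eq_some d h
    -- keys nodup ⇒ exactly one item has key spec
    have : ∀ l : List (String × String), (l.map Prod.fst).Nodup → (spec, v) ∈ l →
        l.filter (fun kv => kv.1 == spec) = [(spec, v)] := by
      intro l
      induction l with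
      | nil => intro _ h; cases h
      | cons p t ih =>
        intro hnd hm
        simp only [List.map_cons, List.nodup_cons] at hnd
        rcases List.mem_cons.mp hm with hm | hm
        · cases hm
          rw [List.filter_cons_of_pos (by simp)]
          have ht : t.filter (fun kv => kv.1 == spec) = [] := by
            simp only [List.filter_eq_nil_iff]
            intro kv hkv
            simp only [beq_iff_eq]
            intro hk
            exact hnd.1 (List.mem_map.mpr ⟨kv, hkv, hk⟩)
          rw [ht]
        · have hp : ¬ (p.1 == spec) = true := by
            simp only [beq_iff_eq]
            intro hk
            exact hnd.1 (by
              have : spec ∈ t.map Prod.fst := List.mem_map.mpr ⟨(spec, v), hm, rfl⟩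
              exact hk ▸ this)
          rw [List.filter_cons, if_neg hp]
          exact ih hnd.2 hm
    have hkeys : (d.items.map Prod.fst).Nodup := by
      have : d.keys = d.items.map Prod.fst := by simp [PySem.Dict.keys]
      exact this ▸ hnd
    exact this d.items hkeys hmem

-- ===== VERDICT =====
theorem getItemsFromSpec_py_spec : Claim_equal_getItemsFromSpec_py := by
  intro spec data withkey _
  unfold Spec_getItemsFromSpec_py getItemsFromSpec_py getItemsFromSpec_py_alt
  by_cases hs : spec = "*"
  · subst hs
    simp only [beq_self_eq_true, Bool.true_or, List.filter_true]
    cases withkey <;> simp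
  · simp only [if_neg hs]
    have hb : (spec == "*") = false := by simp [hs]
    have : (fun kv : String × String => spec == "*" || kv.1 == spec)
         = (fun kv : String × String => kv.1 == spec) := by
      funext kv; simp [hb]
    rw [this, filter_items_key_eq _ (PySem.Dict.nodup_keys_ofList data) spec]
    cases h : (PySem.Dict.ofList data).get? spec <;> cases withkey <;> simp
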